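-- pv_equiv track=rewrite | github.com/DevJoyKo/algorithms | problems_n_solutions/CDSIG_node_changes.py | solution
-- ===== SOURCE A (Python) =====
-- def solution(roadRegister):
--     road_before = {}
--
--     for row_index, row in enumerate(roadRegister):
--         road_before[row_index] = [j for j, connect in enumerate(row) if connect == True]
--
--     road_after = {}
--
--     for node in road_before.keys():
--         if node == len(roadRegister) - 1:
--             new_id = 0
--         else:
--             new_id = node + 1
--         road_after[new_id] = []
--         for connect in road_before[node]:
--             if connect != len(roadRegister) - 1:
--                 new_item_id = connect + 1
--             else:
--                 new_item_id = 0
--             road_after[new_id] += [new_item_id]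
--
--     new_roadRegister = []
--
--     for num, _ in enumerate(roadRegister):
--         num_road = []
--         for j in range(len(roadRegister)):
--             if j in road_after[num]:
--                 num_road += [True]
--             else:
--                 num_road += [False]
--
--         new_roadRegister.append(num_road)
--     return new_roadRegister
-- ===== SOURCE B (Python) =====
-- def solution(roadRegister):
--     n = len(roadRegister)
--     def rot(row):
--         r = (row + [False] * n)[:n]  # fit the row to n columns (pad/truncate)
--         return r[-1:] + r[:-1]       # rotate cells one step, last to front
--     return [rot(row) for row in roadRegister[-1:] + roadRegister[:-1]]
-- ===== Notes on version B (the rewrite author's own statement) =====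
-- stated objective: faster
-- what changed: Replaces A's three-pass sparse reconstruction (dict of True-cell indices per row, index-shifting into a second dict, then rebuilding each row by a per-cell membership scan) with direct sequence rotation: rotate the row order one step by slicing and rotate each n-fitted row's cells one step.
import Mathlib
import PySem

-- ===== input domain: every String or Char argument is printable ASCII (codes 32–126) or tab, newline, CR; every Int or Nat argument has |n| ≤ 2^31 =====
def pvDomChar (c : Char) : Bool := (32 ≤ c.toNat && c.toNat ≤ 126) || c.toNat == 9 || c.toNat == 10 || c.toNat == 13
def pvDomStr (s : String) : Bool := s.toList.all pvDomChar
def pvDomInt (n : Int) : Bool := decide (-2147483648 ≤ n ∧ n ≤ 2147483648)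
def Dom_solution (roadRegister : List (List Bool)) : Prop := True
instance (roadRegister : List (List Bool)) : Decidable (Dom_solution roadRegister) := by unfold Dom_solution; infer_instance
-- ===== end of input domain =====

-- B rotates the rows and the cells of each (n-fitted) row directly by slicing, instead of
-- A's dict-of-True-indices reconstruction with a per-cell membership scan; objective: faster (measured).

-- ===== PORT A =====
def solution (roadRegister : List (List Bool)) : List (List Bool) :=
  let road_before : PySem.Dict Int (List Int) :=
    (PySem.List.enumerate roadRegister 0).foldl
      (fun d p => d.insert p.1 (((PySem.List.enumerate p.2 0).filter (fun q => q.2 == true)).map (·.1)))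
      PySem.Dict.empty
  let road_after : PySem.Dict Int (List Int) :=
    road_before.keys.foldl
      (fun d node =>
        let new_id : Int := if node == (roadRegister.length : Int) - 1 then 0 else node + 1
        let d1 := d.insert new_id []
        (road_before.getD node []).foldl
          (fun d2 connect =>
            let new_item_id : Int := if connect != (roadRegister.length : Int) - 1 then connect + 1 else 0
            d2.insert new_id (d2.getD new_id [] ++ [new_item_id]))
          d1)
      PySem.Dict.empty
  (PySem.List.enumerate roadRegister 0).foldl
    (fun acc p =>
      let num_road := (PySem.List.pyRange 0 (roadRegister.length : Int) 1).foldl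
        (fun r j => if j ∈ road_after.getD p.1 [] then r ++ [true] else r ++ [false]) []
      acc ++ [num_road])
    []

-- ===== PORT B =====
def solution_alt (roadRegister : List (List Bool)) : List (List Bool) :=
  let n := roadRegister.length
  let rot := fun (row : List Bool) =>
    let r := PySem.List.slice (row ++ List.replicate n false) none (some (n : Int))
    PySem.List.slice r (some (-1)) none ++ PySem.List.slice r none (some (-1))
  (PySem.List.slice roadRegister (some (-1)) none ++ PySem.List.slice roadRegister none (some (-1))).map rot

-- ===== PRECONDITION & SPEC =====
def Spec_solution (roadRegister : List (List Bool)) (out : List (List Bool)) : Prop := out = solution_alt roadRegister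
instance (roadRegister : List (List Bool)) (out : List (List Bool)) : Decidable (Spec_solution roadRegister out) := by unfold Spec_solution; infer_instance

-- ===== CLAIM (what is proved, stated in full; the proofs are below) =====
def Claim_equal_solution : Prop := ∀ (roadRegister : List (List Bool)), Dom_solution roadRegister → Spec_solution roadRegister (solution roadRegister)

-- ===== LEMMAS AND PROOFS =====

-- proof-side abbreviations (definitionally the two dict-building passes of `solution`)
def pvTrueIdx (row : List Bool) : List Int :=
  ((PySem.List.enumerate row 0).filter (fun q => q.2 == true)).map (·.1)

def pvShift (n : Nat) (c : Int) : Int := if (c != (n : Int) - 1) = true then c + 1 else 0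

def pvSig (n : Nat) (node : Int) : Int := if (node == (n : Int) - 1) = true then 0 else node + 1

def pvPrev (n k : Nat) : Nat := if k = 0 then n - 1 else k - 1

def pvFit (n : Nat) (row : List Bool) : List Bool := (row ++ List.replicate n false).take n

def pvRB (rr : List (List Bool)) : PySem.Dict Int (List Int) :=
  (PySem.List.enumerate rr 0).foldl
    (fun d p => d.insert p.1 (((PySem.List.enumerate p.2 0).filter (fun q => q.2 == true)).map (·.1)))
    PySem.Dict.empty

def pvRA (rr : List (List Bool)) : PySem.Dict Int (List Int) :=
  (pvRB rr).keys.foldl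
    (fun d node =>
      let new_id : Int := if node == (rr.length : Int) - 1 then 0 else node + 1
      let d1 := d.insert new_id []
      ((pvRB rr).getD node []).foldl
        (fun d2 connect =>
          let new_item_id : Int := if connect != (rr.length : Int) - 1 then connect + 1 else 0
          d2.insert new_id (d2.getD new_id [] ++ [new_item_id]))
        d1)
    PySem.Dict.empty

theorem pvInner (f : Int → Int) (L : List Int) (key : Int) :
  ∀ (d : PySem.Dict Int (List Int)) (v0 : List Int),
    L.foldl (fun d2 c => d2.insert key (d2.getD key [] ++ [f c])) (d.insert key v0)
      = d.insert key (v0 ++ L.map f) := by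
  induction L with
  | nil => intro d v0; simp
  | cons c L ih =>
    intro d v0
    simp only [List.foldl_cons, PySem.Dict.getD_insert, if_true,
      PySem.Dict.insert_insert_self]
    rw [ih d (v0 ++ [f c])]
    simp

theorem pvRB_items (rr : List (List Bool)) :
    (pvRB rr).items = (PySem.List.enumerate rr 0).map (fun p => (p.1, pvTrueIdx p.2)) := by
  have h := PySem.Dict.items_foldl_insert_fresh (PySem.List.enumerate rr 0) (fun p => p.1)
      (fun p => ((PySem.List.enumerate p.2 0).filter (fun q => q.2 == true)).map (·.1))
      (PySem.Dict.empty : PySem.Dict Int (List Int))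
      (by intro a _; simp [PySem.Dict.empty])
      (by rw [show List.map (fun p => p.1) (PySem.List.enumerate rr 0)
                = (PySem.List.enumerate rr 0).map (·.1) from rfl,
              PySem.List.map_fst_enumerate]
          exact PySem.List.nodup_pyRange_one _ _)
  simpa [pvRB, pvTrueIdx] using h

theorem pvRB_keys (rr : List (List Bool)) :
    (pvRB rr).keys = PySem.List.pyRange 0 (rr.length : Int) 1 := by
  have : (pvRB rr).keys = (pvRB rr).items.map (·.1) := rfl
  rw [this, pvRB_items, List.map_map]
  simpa using PySem.List.map_fst_enumerate rr 0

theorem pvRB_getD (rr : List (List Bool)) (k : Nat) (hk : k < rr.length) :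
    (pvRB rr).getD (k : Int) [] = pvTrueIdx rr[k] := by
  apply PySem.Dict.getD_of_mem_items
  · rw [pvRB_items]
    refine List.mem_map.mpr ⟨((k : Int), rr[k]), ?_, by simp⟩
    rw [PySem.List.mem_enumerate_iff]
    exact ⟨k, hk, by simp⟩
  · rw [pvRB_keys]; exact PySem.List.nodup_pyRange_one _ _

theorem pvSig_nodup (n : Nat) :
    ((PySem.List.pyRange 0 (n : Int) 1).map (pvSig n)).Nodup := by
  refine (PySem.List.nodup_pyRange_one 0 (n : Int)).map_on ?_
  intro a ha b hb hab
  rw [PySem.List.mem_pyRange_one] at ha hb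
  unfold pvSig at hab
  by_cases h1 : a = (n : Int) - 1 <;> by_cases h2 : b = (n : Int) - 1 <;>
    simp only [h1, h2, beq_iff_eq, if_true, if_false] at hab <;> omega

theorem pvRA_items (rr : List (List Bool)) :
    (pvRA rr).items = (PySem.List.pyRange 0 (rr.length : Int) 1).map
      (fun node => (pvSig rr.length node, ((pvRB rr).getD node []).map (pvShift rr.length))) := by
  unfold pvRA
  have hbody : (fun (d : PySem.Dict Int (List Int)) (node : Int) =>
      let new_id : Int := if node == (rr.length : Int) - 1 then 0 else node + 1
      let d1 := d.insert new_id []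
      ((pvRB rr).getD node []).foldl
        (fun d2 connect =>
          let new_item_id : Int := if connect != (rr.length : Int) - 1 then connect + 1 else 0
          d2.insert new_id (d2.getD new_id [] ++ [new_item_id]))
        d1)
      = (fun d node => d.insert (pvSig rr.length node)
          (((pvRB rr).getD node []).map (pvShift rr.length))) := by
    funext d node
    show ((pvRB rr).getD node []).foldl
        (fun d2 c => d2.insert (if node == (rr.length : Int) - 1 then 0 else node + 1)
          (d2.getD (if node == (rr.length : Int) - 1 then 0 else node + 1) []
            ++ [(fun c => if c != (rr.length : Int) - 1 then c + 1 else 0) c]))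
        (d.insert (if node == (rr.length : Int) - 1 then 0 else node + 1) []) = _
    rw [pvInner (fun c => if c != (rr.length : Int) - 1 then c + 1 else 0)]
    simp only [List.nil_append, pvSig]
    rfl
  rw [hbody]
  have h := PySem.Dict.items_foldl_insert_fresh (pvRB rr).keys (pvSig rr.length)
      (fun node => ((pvRB rr).getD node []).map (pvShift rr.length))
      (PySem.Dict.empty : PySem.Dict Int (List Int))
      (by intro a _; simp [PySem.Dict.empty])
      (by rw [pvRB_keys]; exact pvSig_nodup rr.length)
  rw [pvRB_keys] at h
  simpa [pvRB_keys] using h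

theorem pvPrev_lt (n k : Nat) (hk : k < n) : pvPrev n k < n := by
  unfold pvPrev; split <;> omega

theorem pvRA_getD (rr : List (List Bool)) (k : Nat) (hk : k < rr.length) :
    (pvRA rr).getD (k : Int) []
      = (pvTrueIdx (rr[pvPrev rr.length k]'(pvPrev_lt _ _ hk))).map (pvShift rr.length) := by
  have hp := pvPrev_lt rr.length k hk
  have hsig : pvSig rr.length ((pvPrev rr.length k : Nat) : Int) = (k : Int) := by
    unfold pvSig pvPrev
    by_cases h : k = 0
    · have hn : 0 < rr.length := by omega
      have hc : ((rr.length - 1 : Nat) : Int) = (rr.length : Int) - 1 := by omega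
      simp [h, hc]
    · have hc : ¬ (((k - 1 : Nat) : Int) = (rr.length : Int) - 1) := by omega
      simp only [if_neg h]
      rw [if_neg (by simpa using hc)]
      omega
  apply PySem.Dict.getD_of_mem_items
  · rw [pvRA_items]
    refine List.mem_map.mpr ⟨((pvPrev rr.length k : Nat) : Int), ?_, ?_⟩
    · rw [PySem.List.mem_pyRange_one]
      constructor <;> omega
    · rw [pvRB_getD rr (pvPrev rr.length k) hp, hsig]
  · have hkeys : (pvRA rr).keys
        = (PySem.List.pyRange 0 (rr.length : Int) 1).map (pvSig rr.length) := by
      have : (pvRA rr).keys = (pvRA rr).items.map (·.1) := rfl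
      rw [this, pvRA_items, List.map_map]
      rfl
    rw [hkeys]
    exact pvSig_nodup rr.length

theorem pvMem (n : Nat) (src : List Bool) (jn : Nat) (hj : jn < n) :
    ((jn : Int) ∈ (pvTrueIdx src).map (pvShift n)) ↔ src.getD (pvPrev n jn) false = true := by
  constructor
  · rintro hm
    rcases List.mem_map.mp hm with ⟨c, hc, hshift⟩
    rcases List.mem_map.mp hc with ⟨q, hq, rfl⟩
    rcases List.mem_filter.mp hq with ⟨hqe, hqt⟩
    rcases (PySem.List.mem_enumerate_iff _ _ _).mp hqe with ⟨m, hm', rfl⟩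
    simp only [zero_add] at hshift hqt ⊢
    have hqt' : src[m] = true := by simpa using hqt
    have hmp : m = pvPrev n jn := by
      unfold pvShift at hshift
      by_cases h : (m : Int) = (n : Int) - 1
      · rw [if_neg (by simpa using h)] at hshift
        have h0 : jn = 0 := by omega
        unfold pvPrev; rw [if_pos h0]; omega
      · rw [if_pos (by simpa using h)] at hshift
        have h0 : jn ≠ 0 := by omega
        unfold pvPrev; rw [if_neg h0]; omega
    subst hmp
    rw [List.getD_eq_getElem src false hm']
    exact hqt'
  · intro hg
    have hlt : pvPrev n jn < src.length := by
      by_contra h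
      rw [List.getD_eq_default src false (by omega)] at hg
      exact Bool.false_ne_true hg
    rw [List.getD_eq_getElem src false hlt] at hg
    refine List.mem_map.mpr ⟨((pvPrev n jn : Nat) : Int), ?_, ?_⟩
    · refine List.mem_map.mpr ⟨(((pvPrev n jn : Nat) : Int), src[pvPrev n jn]), ?_, rfl⟩
      refine List.mem_filter.mpr ⟨?_, by simpa using hg⟩
      exact (PySem.List.mem_enumerate_iff _ _ _).mpr ⟨pvPrev n jn, hlt, by simp⟩
    · unfold pvShift pvPrev
      by_cases h : jn = 0
      · have hn : 0 < n := by omega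
        rw [if_pos h, if_neg (by simp; omega)]
        omega
      · rw [if_neg h, if_pos (by simp; omega)]
        omega

theorem pvMemDecide (n : Nat) (src : List Bool) (jn : Nat) (hj : jn < n) :
    decide ((jn : Int) ∈ (pvTrueIdx src).map (pvShift n)) = src.getD (pvPrev n jn) false := by
  cases hgd : src.getD (pvPrev n jn) false
  · have h := pvMem n src jn hj
    rw [hgd] at h
    simp [h]
  · have h := pvMem n src jn hj
    rw [hgd] at h
    simp [h]

theorem pvFit_length (n : Nat) (src : List Bool) : (pvFit n src).length = n := by
  simp only [pvFit, List.length_take, List.length_append, List.length_replicate]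
  omega

theorem pvFit_get (n : Nat) (src : List Bool) (t : Nat) (ht : t < n) :
    (pvFit n src)[t]'(by rw [pvFit_length]; exact ht) = src.getD t false := by
  unfold pvFit
  rw [List.getElem_take]
  by_cases h : t < src.length
  · rw [List.getElem_append_left h, List.getD_eq_getElem src false h]
  · rw [List.getElem_append_right (by omega : src.length ≤ t), List.getElem_replicate,
        List.getD_eq_default src false (by omega : src.length ≤ t)]

theorem pvRow (n : Nat) (hn : 0 < n) (src : List Bool) :
    (PySem.List.pyRange 0 (n : Int) 1).map
        (fun j => decide (j ∈ (pvTrueIdx src).map (pvShift n)))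
      = PySem.List.slice (pvFit n src) (some (-1)) none
        ++ PySem.List.slice (pvFit n src) none (some (-1)) := by
  rw [PySem.List.slice_from_neg_one, PySem.List.slice_to_neg_one, pvFit_length]
  apply List.ext_getElem
  · simp only [List.length_map, PySem.List.length_pyRange_one, List.length_append,
      List.length_drop, List.length_dropLast, pvFit_length]
    omega
  · intro i hi1 hi2
    have hin : i < n := by
      simpa only [List.length_map, PySem.List.length_pyRange_one, Int.sub_zero,
        Int.toNat_natCast] using hi1
    rw [List.getElem_map, PySem.List.getElem_pyRange_one]
    simp only [zero_add]
    rw [pvMemDecide n src i hin]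
    by_cases h0 : i = 0
    · subst h0
      rw [List.getElem_append_left (by simp [pvFit_length]; omega)]
      simp only [List.getElem_drop]
      have hidx : n - 1 + 0 = n - 1 := by omega
      simp only [hidx]
      rw [pvFit_get n src (n - 1) (by omega)]
      rfl
    · rw [List.getElem_append_right (by simp [pvFit_length]; omega)]
      simp only [List.getElem_dropLast]
      have hidx : i - (List.drop (n - 1) (pvFit n src)).length = i - 1 := by
        simp [pvFit_length]; omega
      simp only [hidx]
      rw [pvFit_get n src (i - 1) (by omega)]
      unfold pvPrev
      rw [if_neg h0]

theorem pvA_eq (rr : List (List Bool)) :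
    solution rr = (PySem.List.enumerate rr 0).map
      (fun p => (PySem.List.pyRange 0 (rr.length : Int) 1).map
        (fun j => decide (j ∈ (pvRA rr).getD p.1 []))) := by
  show ((PySem.List.enumerate rr 0).foldl
      (fun acc p => acc ++ [(PySem.List.pyRange 0 (rr.length : Int) 1).foldl
        (fun r j => if j ∈ (pvRA rr).getD p.1 [] then r ++ [true] else r ++ [false]) []])
      []) = _
  have hin : ∀ (S : List Int), (fun (r : List Bool) (j : Int) =>
      if j ∈ S then r ++ [true] else r ++ [false])
      = (fun (r : List Bool) (j : Int) => r ++ [decide (j ∈ S)]) := by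
    intro S; funext r j; by_cases h : j ∈ S <;> simp [h]
  simp only [hin, PySem.List.foldl_append_singleton_eq_map, List.nil_append]

-- ===== VERDICT (by name: the statement is the Claim_ definition above) =====
theorem solution_spec : Claim_equal_solution := by
  intro rr _
  unfold Spec_solution
  rw [pvA_eq]
  show _ = (PySem.List.slice rr (some (-1)) none ++ PySem.List.slice rr none (some (-1))).map
      (fun row =>
        PySem.List.slice (PySem.List.slice (row ++ List.replicate rr.length false) none
          (some (rr.length : Int))) (some (-1)) none
        ++ PySem.List.slice (PySem.List.slice (row ++ List.replicate rr.length false) none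
          (some (rr.length : Int))) none (some (-1)))
  have hfit : ∀ row : List Bool,
      PySem.List.slice (row ++ List.replicate rr.length false) none (some (rr.length : Int))
        = pvFit rr.length row := by
    intro row
    rw [PySem.List.slice_to_natCast]
    rfl
  simp only [hfit, PySem.List.slice_from_neg_one, PySem.List.slice_to_neg_one]
  apply List.ext_getElem
  · simp only [List.length_map, PySem.List.length_enumerate, List.length_append,
      List.length_drop, List.length_dropLast]
    omega
  · intro k h1 h2
    have hk : k < rr.length := by simpa using h1
    have hn : 0 < rr.length := by omega
    rw [List.getElem_map, List.getElem_map, PySem.List.getElem_enumerate]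
    simp only [zero_add]
    rw [pvRA_getD rr k hk]
    rw [pvRow rr.length hn (rr[pvPrev rr.length k]'(pvPrev_lt _ _ hk))]
    have h2' : k < (List.drop (rr.length - 1) rr ++ rr.dropLast).length := by
      simpa using h2
    have hrow : (List.drop (rr.length - 1) rr ++ rr.dropLast)[k]'h2'
        = rr[pvPrev rr.length k]'(pvPrev_lt _ _ hk) := by
      by_cases h0 : k = 0
      · subst h0
        rw [List.getElem_append_left (by simp; omega)]
        simp only [List.getElem_drop]
        have hidx : rr.length - 1 + 0 = pvPrev rr.length 0 := by simp [pvPrev]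
        simp only [hidx]
      · rw [List.getElem_append_right (by simp; omega)]
        simp only [List.getElem_dropLast]
        have hidx : k - (List.drop (rr.length - 1) rr).length = pvPrev rr.length k := by
          unfold pvPrev; rw [if_neg h0]; simp; omega
        simp only [hidx]
    rw [hrow, PySem.List.slice_from_neg_one, PySem.List.slice_to_neg_one]
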